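-- pv_equiv track=rewrite | github.com/saikoneru/NMT_Localization | scripts/utils.py | doc_format
-- ===== SOURCE A (Python) =====
-- def doc_format(app_names, data):
--     apps = list(dict.fromkeys(app_names))
--     doc_dict = {}
--     doc_data = ['<d>']
--     for app in apps:
--         doc_dict[app] = []
--
--     for i in range(len(data)):
--         doc_dict[app_names[i]].append(data[i])
--
--     for app in apps:
--         doc_data.extend(doc_dict[app])
--         doc_data.append('<d>')
--
--     return doc_data
-- ===== SOURCE B (Python) =====
-- def doc_format(app_names, data):
--     # Iterative partition: repeatedly peel off the first remaining app name,
--     # emit its group from the remaining (name, datum) pairs, and drop that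
--     # app from the rest.  No dict, no index arithmetic.
--     out = ['<d>']
--     names = list(app_names)
--     pairs = list(zip(app_names, data))
--     while names:
--         app = names[0]
--         out.extend(d for (n, d) in pairs if n == app)
--         out.append('<d>')
--         names = [n for n in names[1:] if n != app]
--         pairs = [(n, d) for (n, d) in pairs if n != app]
--     return out
-- ===== Notes on version B (the rewrite author's own statement) =====
-- stated objective: alternative
-- what changed: Replaces A's three staged dict passes (init buckets, fill by index, flush) with an iterative partition: a while loop that repeatedly peels off the first remaining app name, emits its group from the zipped name/data pairs, and drops that app from the remaining state.
import Mathlib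
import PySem

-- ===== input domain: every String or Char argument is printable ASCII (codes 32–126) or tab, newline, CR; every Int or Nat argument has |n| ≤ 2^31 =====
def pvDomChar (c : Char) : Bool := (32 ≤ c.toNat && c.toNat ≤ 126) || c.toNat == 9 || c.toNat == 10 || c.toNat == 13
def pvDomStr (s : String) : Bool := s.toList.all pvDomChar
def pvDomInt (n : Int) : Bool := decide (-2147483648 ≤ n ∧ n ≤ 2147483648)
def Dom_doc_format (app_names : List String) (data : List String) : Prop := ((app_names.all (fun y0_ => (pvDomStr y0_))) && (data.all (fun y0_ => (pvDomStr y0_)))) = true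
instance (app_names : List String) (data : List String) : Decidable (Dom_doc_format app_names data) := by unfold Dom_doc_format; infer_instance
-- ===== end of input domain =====

-- B replaces A's three staged dict passes by an iterative partition over the name/data
-- pairs: peel off the first remaining app, emit its group, drop it from the rest
-- (objective: alternative). Equivalence is claimed where data is no longer than
-- app_names; beyond that A raises IndexError.

-- ===== PORT A =====
-- Literal port of A. app_names[i] / data[i] are ported with pyGetD (default "") — under
-- Pre_doc_format every index is in range, so the default is never read; where it would be,
-- the Python raises IndexError and the input is excluded by Pre_.
def doc_format (app_names : List String) (data : List String) : List String :=
  let apps := PySem.List.dedup app_names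
  let docDict : PySem.Dict String (List String) :=
    apps.foldl (fun d a => d.insert a []) PySem.Dict.empty
  let docDict := (PySem.List.pyRange 0 data.length 1).foldl
    (fun d i => d.modify (PySem.List.pyGetD app_names i "") []
      (fun l => l ++ [PySem.List.pyGetD data i ""])) docDict
  apps.foldl (fun acc a => (acc ++ docDict.getD a []) ++ ["<d>"]) ["<d>"]

-- ===== PORT B =====
-- Helper 'go' of Source B: recursion on the remaining app names, carrying the remaining
-- (name, datum) pairs; each step emits the first app's group and partitions it away.
-- Source B's while loop over the shrinking (names, pairs) state, with 'out' the accumulator.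
-- The fuel argument (names.length at the top call) only makes it a total structural
-- recursion; each iteration strictly shrinks names, so the fuel is never exhausted.
def docFormatLoop : Nat → List String → List (String × String) → List String → List String
  | _, [], _, out => out
  | 0, _ :: _, _, out => out
  | fuel + 1, app :: names, pairs, out =>
    docFormatLoop fuel (names.filter (fun n => n != app)) (pairs.filter (fun p => p.1 != app))
      ((out ++ (pairs.filter (fun p => p.1 == app)).map Prod.snd) ++ ["<d>"])

def doc_format_alt (app_names : List String) (data : List String) : List String :=
  docFormatLoop app_names.length app_names (app_names.zip data) ["<d>"]

-- ===== PRECONDITION & SPEC =====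
-- A raises IndexError (app_names[i]) whenever data is longer than app_names; those inputs are excluded.
def Pre_doc_format (app_names : List String) (data : List String) : Prop :=
  data.length ≤ app_names.length
instance (app_names : List String) (data : List String) : Decidable (Pre_doc_format app_names data) := by unfold Pre_doc_format; infer_instance
def pvWitness_doc_format : List String × List String := (["a", "b", "a"], ["x", "y", "z"])

def Spec_doc_format (app_names : List String) (data : List String) (out : List String) : Prop := out = doc_format_alt app_names data
instance (app_names : List String) (data : List String) (out : List String) : Decidable (Spec_doc_format app_names data out) := by unfold Spec_doc_format; infer_instance

-- ===== CLAIM (what is proved, stated in full; the proofs are below) =====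
def Claim_equal_doc_format : Prop := ∀ (app_names : List String) (data : List String), Dom_doc_format app_names data → Pre_doc_format app_names data → Spec_doc_format app_names data (doc_format app_names data)

-- ===== LEMMAS AND PROOFS =====

-- An index loop reading xs[k] and ys[k] for k < ys.length ≤ xs.length is the fold over the zip.
theorem foldl_getD_zip {α β γ : Type} (g : γ → α → β → γ) (da : α) (db : β) :
    ∀ (ys : List β) (xs : List α) (c : γ), ys.length ≤ xs.length →
    (List.range ys.length).foldl (fun d k => g d (xs.getD k da) (ys.getD k db)) c
      = (xs.zip ys).foldl (fun d p => g d p.1 p.2) c := by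
  intro ys
  induction ys with
  | nil => intro xs c _; simp
  | cons y ys ih =>
    intro xs c h
    match xs with
    | [] => simp at h
    | x :: xs =>
      simp only [List.length_cons]
      rw [List.range_succ_eq_map, List.foldl_cons, List.foldl_map]
      simpa using ih xs (g c x y) (by simpa using h)

-- The pyRange/pyGetD form of the same loop.
theorem foldl_pyGetD_zip {α β γ : Type} [Inhabited α] [Inhabited β]
    (g : γ → α → β → γ) (da : α) (db : β) (ys : List β) (xs : List α) (c : γ)
    (h : ys.length ≤ xs.length) :
    (PySem.List.pyRange 0 ys.length 1).foldl
      (fun d i => g d (PySem.List.pyGetD xs i da) (PySem.List.pyGetD ys i db)) c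
      = (xs.zip ys).foldl (fun d p => g d p.1 p.2) c := by
  rw [PySem.List.pyRange_zero_nat, List.foldl_map]
  simp only [PySem.List.pyGetD_natCast]
  exact foldl_getD_zip g da db ys xs c h

-- Every value in the bucket-initialisation dict is [].
theorem getD_foldl_insert_nil {κ : Type} [BEq κ] [LawfulBEq κ] [DecidableEq κ] :
    ∀ (l : List κ) (d : PySem.Dict κ (List String)) (k : κ),
      (∀ k', d.getD k' [] = []) → (l.foldl (fun d a => d.insert a []) d).getD k [] = [] := by
  intro l
  induction l with
  | nil => intro d k h; exact h k
  | cons a l ih =>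
    intro d k h
    refine ih _ k ?_
    intro k'
    rw [PySem.Dict.getD_insert]
    split <;> simp [h k']

-- Occurrences of an element already in the set are no-ops of the dedup fold.
theorem foldl_setAdd_filter_ne {α : Type} [BEq α] [LawfulBEq α] (a : α) :
    ∀ (l : List α) (s : PySem.Set α), a ∈ s →
      l.foldl PySem.Set.add s = (l.filter (fun x => x != a)).foldl PySem.Set.add s := by
  intro l
  induction l with
  | nil => intro s _; rfl
  | cons x l ih =>
    intro s hs
    by_cases hx : x = a
    · subst hx
      have hadd : PySem.Set.add s x = s := by
        unfold PySem.Set.add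
        rw [if_pos ((PySem.Set.contains_iff s x).mpr hs)]
      simp only [List.filter_cons, List.foldl_cons, hadd]
      rw [ih s hs]
      simp
    · have hmem : a ∈ PySem.Set.add s x := (PySem.Set.mem_add s x a).mpr (Or.inl hs)
      simp only [List.filter_cons]
      have hkeep : (x != a) = true := by simp [hx]
      rw [hkeep]
      simp only [if_true, List.foldl_cons]
      exact ih _ hmem

-- An element never seen again stays put at the front of the dedup fold.
theorem foldl_setAdd_cons {α : Type} [BEq α] [LawfulBEq α] (a : α) :
    ∀ (l : List α) (s : List α), (∀ x ∈ l, x ≠ a) →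
      l.foldl PySem.Set.add (a :: s) = a :: l.foldl PySem.Set.add s := by
  intro l
  induction l with
  | nil => intro s _; rfl
  | cons x l ih =>
    intro s h
    have hx : x ≠ a := h x (by simp)
    have hc : PySem.Set.contains (a :: s) x = PySem.Set.contains s x := by
      simp [PySem.Set.contains, hx]
    have hstep : PySem.Set.add (a :: s) x = a :: PySem.Set.add s x := by
      unfold PySem.Set.add
      rw [hc]
      split <;> simp
    rw [List.foldl_cons, hstep, List.foldl_cons]
    exact ih _ (fun y hy => h y (by simp [hy]))

-- dict.fromkeys peels its first key and never revisits it.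
theorem dedup_cons_filter {α : Type} [BEq α] [LawfulBEq α] (a : α) (l : List α) :
    PySem.List.dedup (a :: l) = a :: PySem.List.dedup (l.filter (fun x => x != a)) := by
  unfold PySem.List.dedup PySem.Set.ofList
  rw [List.foldl_cons]
  have hempty : PySem.Set.add PySem.Set.empty a = [a] := by
    simp [PySem.Set.add, PySem.Set.empty]
  rw [hempty]
  rw [foldl_setAdd_filter_ne a l [a] (by simp)]
  exact foldl_setAdd_cons a _ [] (by intro x hx; simpa using (List.of_mem_filter hx))

-- The iterative partition appends exactly the per-distinct-app groups, in first-occurrence order.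
theorem docFormatLoop_eq :
    ∀ (fuel : Nat) (names : List String) (pairs : List (String × String)) (out : List String),
      names.length ≤ fuel →
      docFormatLoop fuel names pairs out
        = out ++ (PySem.List.dedup names).flatMap
            (fun a => ((pairs.filter (fun p => p.1 == a)).map Prod.snd) ++ ["<d>"]) := by
  intro fuel
  induction fuel with
  | zero =>
    intro names pairs out h
    have : names = [] := List.eq_nil_of_length_eq_zero (Nat.le_zero.mp h)
    subst this
    simp [docFormatLoop, PySem.List.dedup, PySem.Set.ofList, PySem.Set.empty]
  | succ fuel ih =>
    intro names pairs out h
    match names with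
    | [] => simp [docFormatLoop, PySem.List.dedup, PySem.Set.ofList, PySem.Set.empty]
    | app :: names =>
      rw [docFormatLoop, dedup_cons_filter, List.flatMap_cons,
        ih (names.filter (fun n => n != app)) (pairs.filter (fun p => p.1 != app)) _
          (le_trans (List.length_filter_le _ _) (Nat.le_of_succ_le_succ h))]
      have hcong :
          (PySem.List.dedup (names.filter (fun n => n != app))).flatMap
            (fun a => (((pairs.filter (fun p => p.1 != app)).filter (fun p => p.1 == a)).map Prod.snd) ++ ["<d>"])
          = (PySem.List.dedup (names.filter (fun n => n != app))).flatMap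
            (fun a => ((pairs.filter (fun p => p.1 == a)).map Prod.snd) ++ ["<d>"]) := by
        apply List.flatMap_congr
        intro b hb
        have hbne : b ≠ app := by
          have : b ∈ names.filter (fun x => x != app) := by
            simpa [PySem.List.mem_dedup] using hb
          simpa using (List.of_mem_filter this)
        congr 1
        rw [List.filter_filter]
        congr 1
        apply List.filter_congr
        intro p _
        by_cases hp : p.1 = b
        · simp [hp, hbne]
        · simp [hp]
      rw [hcong]
      simp [List.append_assoc]

-- ===== VERDICT (by name: the statement is the Claim_ definition above) =====
theorem doc_format_spec : Claim_equal_doc_format := by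
  intro app_names data _ hpre
  unfold Spec_doc_format doc_format doc_format_alt
  simp only []
  have hz : data.length ≤ app_names.length := hpre
  rw [foldl_pyGetD_zip (fun d a b => PySem.Dict.modify d a [] (fun l => l ++ [b])) "" "" data app_names _ hz]
  have hcanon : ∀ acc : List String,
      (PySem.List.dedup app_names).foldl
        (fun acc a =>
          (acc ++ (((app_names.zip data).foldl (fun d p => PySem.Dict.modify d p.1 [] (fun l => l ++ [p.2]))
            ((PySem.List.dedup app_names).foldl (fun d a => d.insert a []) PySem.Dict.empty)).getD a [])) ++ ["<d>"]) acc
      = acc ++ (PySem.List.dedup app_names).flatMap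
          (fun a => (((app_names.zip data).filter (fun p => p.1 == a)).map Prod.snd) ++ ["<d>"]) := by
    intro acc
    rw [PySem.List.foldl_congr_mem (g := fun acc a =>
      acc ++ ((((app_names.zip data).filter (fun p => p.1 == a)).map Prod.snd) ++ ["<d>"]))]
    · exact PySem.List.foldl_append_eq_flatMap _ _ _
    · intro acc2 a _
      rw [PySem.Dict.getD_foldl_modify_append]
      rw [getD_foldl_insert_nil _ _ _ (fun k' => PySem.Dict.getD_empty k' [])]
      simp
  rw [hcanon ["<d>"], docFormatLoop_eq app_names.length app_names _ ["<d>"] le_rfl]
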